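-- pv_equiv track=rewrite | github.com/diego2500garza/CAAP-SC | final-project/interestinganagrams.py | rhymesto
-- ===== SOURCE A (Python) =====
-- def rhymesto(anagram_list):
-- 	rhymes_l = []
-- 	x = 0
-- 	# will index every single list
-- 	for anagram in anagram_list:
-- 		nums = anagram[-1]
-- 		rhymes = 0
-- 		# will go through every single word in the list and position will run through and not
-- 		# include the int part of the list
-- 		for position in range(len(anagram)-1):
-- 		# this will set last three to be equal to the last three leters in each word
-- 			last_three = anagram[position][-3:]
-- 			counter = 0
-- 			for i in range(len(anagram)-1):
-- 				# checks to see if j is not a integer, while it is not then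
-- 				# it will check the last three letters this will then print
-- 				# the list that has words that rhyme
-- 				if anagram[i][-3:] == last_three:
-- 					counter += 1
-- 					# this will essentially count the number of occurences
-- 					# that the anagram at position [i][-3] is equal to the last three in the next word.
-- 			if counter > 1:
-- 				rhymes += 1
--
-- 		if rhymes > 0:
-- 			rhymes_l.append(anagram)
-- 	return rhymes_l
-- ===== SOURCE B (Python) =====
-- def rhymesto(anagram_list):
--     result = []
--     for anagram in anagram_list:
--         suffixes = sorted(w[-3:] for w in anagram[:-1])
--         if any(s == t for s, t in zip(suffixes, suffixes[1:])):
--             result.append(anagram)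
--     return result
-- ===== Notes on version B (the rewrite author's own statement) =====
-- stated objective: faster
-- what changed: Replaces the nested quadratic per-list scan that counts suffix occurrences for every position with sorting the 3-letter suffixes once and a single adjacent-pair scan for a duplicate.
-- crash fix: On inputs containing an empty inner list A raises IndexError at anagram[-1]; B returns the normally filtered result, treating the empty list as rhyme-free. — e.g. on rhymesto([["cat", "1"], []]): A raises IndexError, B returns []
import Mathlib
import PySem

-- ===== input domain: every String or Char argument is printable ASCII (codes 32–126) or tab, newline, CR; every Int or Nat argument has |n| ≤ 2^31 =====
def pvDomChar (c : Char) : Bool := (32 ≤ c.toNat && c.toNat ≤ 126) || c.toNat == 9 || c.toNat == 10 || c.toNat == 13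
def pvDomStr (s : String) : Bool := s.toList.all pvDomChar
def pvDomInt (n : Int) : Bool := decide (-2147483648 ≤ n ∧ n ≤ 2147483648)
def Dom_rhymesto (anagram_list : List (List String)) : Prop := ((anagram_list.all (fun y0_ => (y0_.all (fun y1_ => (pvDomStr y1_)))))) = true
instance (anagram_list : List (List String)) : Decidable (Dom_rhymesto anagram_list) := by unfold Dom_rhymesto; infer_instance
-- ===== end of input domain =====

-- B sorts each anagram's 3-letter word suffixes once and scans adjacent pairs for a duplicate,
-- replacing A's nested per-position occurrence counting.


-- ===== PORT A =====
def rhymesto (anagram_list : List (List String)) : List (List String) :=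
  anagram_list.foldl (fun rhymes_l anagram =>
    -- nums = anagram[-1]  (value unused; IndexError on an empty list — excluded by Pre_)
    let _nums := PySem.List.pyGet? anagram (-1)
    let rhymes : Int :=
      (PySem.List.pyRange 0 (PySem.List.len anagram - 1) 1).foldl (fun rhymes position =>
        let last_three := PySem.Str.slice (PySem.List.pyGetD anagram position "") (some (-3)) none
        let counter : Int :=
          (PySem.List.pyRange 0 (PySem.List.len anagram - 1) 1).foldl (fun counter i =>
            if PySem.Str.slice (PySem.List.pyGetD anagram i "") (some (-3)) none == last_three
            then counter + 1 else counter) 0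
        if counter > 1 then rhymes + 1 else rhymes) 0
    if rhymes > 0 then rhymes_l ++ [anagram] else rhymes_l) []

-- ===== PORT B =====
def rhymesto_alt (anagram_list : List (List String)) : List (List String) :=
  anagram_list.foldl (fun result anagram =>
    let suffixes := PySem.List.sorted
      ((PySem.List.slice anagram none (some (-1))).map
        (fun w => PySem.Str.slice w (some (-3)) none)) (fun x => x) false
    if (suffixes.zip (PySem.List.slice suffixes (some 1) none)).any (fun p => p.1 == p.2)
    then result ++ [anagram] else result) []

-- ===== PRECONDITION & SPEC =====
-- Pre_ excludes exactly the inputs containing an empty inner list, on which A raises IndexError at anagram[-1].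
def Pre_rhymesto (anagram_list : List (List String)) : Prop :=
  (anagram_list.all (fun a => !a.isEmpty)) = true
instance (anagram_list : List (List String)) : Decidable (Pre_rhymesto anagram_list) := by unfold Pre_rhymesto; infer_instance
def pvWitness_rhymesto : List (List String) := [["star", "rats", "2"], ["meat", "team", "cat", "2"]]

-- On inputs containing an empty inner list A raises IndexError at anagram[-1]; B returns the normally filtered result.
def Raises_rhymesto (anagram_list : List (List String)) : Prop :=
  (anagram_list.any (fun a => a.isEmpty)) = true
instance (anagram_list : List (List String)) : Decidable (Raises_rhymesto anagram_list) := by unfold Raises_rhymesto; infer_instance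
def pvRaiseWitness_rhymesto : List (List String) := [["cat", "1"], []]
def pvRaiseWitnessOut_rhymesto : List (List String) := []

def Spec_rhymesto (anagram_list : List (List String)) (out : List (List String)) : Prop := out = rhymesto_alt anagram_list
instance (anagram_list : List (List String)) (out : List (List String)) : Decidable (Spec_rhymesto anagram_list out) := by unfold Spec_rhymesto; infer_instance

-- ===== CLAIM (what is proved, stated in full; the proofs are below) =====
def Claim_equal_rhymesto : Prop := ∀ (anagram_list : List (List String)), Dom_rhymesto anagram_list → Pre_rhymesto anagram_list → Spec_rhymesto anagram_list (rhymesto anagram_list)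
def Claim_raises_rhymesto : Prop := (∀ (anagram_list : List (List String)), Dom_rhymesto anagram_list → Raises_rhymesto anagram_list → ¬ Pre_rhymesto anagram_list) ∧ (Dom_rhymesto (pvRaiseWitness_rhymesto) ∧ Raises_rhymesto (pvRaiseWitness_rhymesto) ∧ rhymesto_alt (pvRaiseWitness_rhymesto) = pvRaiseWitnessOut_rhymesto)

-- ===== LEMMAS AND PROOFS =====

-- the 3-letter suffix w[-3:]
def pvLast3 (w : String) : String := PySem.Str.slice w (some (-3)) none
-- the suffixes of the words of an anagram (its final entry, the count string, dropped)
def pvSuffs (anagram : List String) : List String := anagram.dropLast.map pvLast3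
-- A's and B's per-anagram step functions (definitionally the lambdas in the ports)
def pvStepA (rhymes_l : List (List String)) (anagram : List String) : List (List String) :=
  let _nums := PySem.List.pyGet? anagram (-1)
  let rhymes : Int :=
    (PySem.List.pyRange 0 (PySem.List.len anagram - 1) 1).foldl (fun rhymes position =>
      let last_three := PySem.Str.slice (PySem.List.pyGetD anagram position "") (some (-3)) none
      let counter : Int :=
        (PySem.List.pyRange 0 (PySem.List.len anagram - 1) 1).foldl (fun counter i =>
          if PySem.Str.slice (PySem.List.pyGetD anagram i "") (some (-3)) none == last_three
          then counter + 1 else counter) 0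
      if counter > 1 then rhymes + 1 else rhymes) 0
  if rhymes > 0 then rhymes_l ++ [anagram] else rhymes_l
def pvStepB (result : List (List String)) (anagram : List String) : List (List String) :=
  let suffixes := PySem.List.sorted
    ((PySem.List.slice anagram none (some (-1))).map
      (fun w => PySem.Str.slice w (some (-3)) none)) (fun x => x) false
  if (suffixes.zip (PySem.List.slice suffixes (some 1) none)).any (fun p => p.1 == p.2)
  then result ++ [anagram] else result

-- positivity of A's conditional-increment fold is existence
theorem pv_foldl_ite_pos (f : Nat → Prop) [DecidablePred f] (r : List Nat) :
    (0 < r.foldl (fun (rh : Int) k => if f k then rh + 1 else rh) 0) ↔ ∃ k ∈ r, f k := by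
  rw [show (fun (rh : Int) k => if f k then rh + 1 else rh)
        = (fun (rh : Int) k => if (fun k' => decide (f k')) k = true then rh + 1 else rh) from by
      funext rh k; simp]
  rw [PySem.List.foldl_count_if]
  simp [List.countP_pos_iff]

-- a ≤-sorted list has an equal adjacent pair iff it has a duplicate
theorem pv_adj_any {α : Type} [LinearOrder α] [BEq α] [LawfulBEq α] (s : List α)
    (hs : s.Pairwise (· ≤ ·)) :
    ((s.zip s.tail).any (fun p => p.1 == p.2) = true) ↔ ¬ s.Nodup := by
  induction s with
  | nil => simp
  | cons a t IH =>
    cases t with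
    | nil => simp
    | cons b u =>
      have hab : a ≤ b := (List.pairwise_cons.mp hs).1 b (by simp)
      have htail : (b :: u).Pairwise (· ≤ ·) := (List.pairwise_cons.mp hs).2
      by_cases hEq : a = b
      · subst hEq
        simp [List.zip, List.nodup_cons]
      · have hlt : a < b := lt_of_le_of_ne hab hEq
        have hnotmem : a ∉ b :: u := by
          intro hmem
          rcases List.mem_cons.mp hmem with h | h
          · exact hEq h
          · have hbx : b ≤ a := (List.pairwise_cons.mp htail).1 a h
            exact absurd (lt_of_lt_of_le hlt hbx) (lt_irrefl a)
        have hiff := IH htail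
        simp only [List.tail_cons] at hiff
        rw [show ((a :: b :: u).zip (a :: b :: u).tail).any (fun p => p.1 == p.2)
              = ((b :: u).zip u).any (fun p => p.1 == p.2) from by
            simp [List.zip, beq_eq_false_iff_ne.mpr hEq]]
        rw [hiff]
        simp [List.nodup_cons, hnotmem]

theorem pv_exists_count {α : Type} [BEq α] [LawfulBEq α] [DecidableEq α] (l : List α) :
    (∃ x ∈ l, 1 < l.count x) ↔ ¬ l.Nodup := by
  rw [List.nodup_iff_count_le_one]
  push Not
  constructor
  · rintro ⟨x, _, hx⟩; exact ⟨x, hx⟩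
  · rintro ⟨x, hx⟩
    exact ⟨x, List.count_pos_iff.mp (by omega), hx⟩

theorem pv_suffs_eq (anagram : List String) (m : Nat) (h : anagram.length = m + 1) :
    pvSuffs anagram = (List.range m).map (fun k => pvLast3 (anagram.getD k "")) := by
  apply List.ext_getElem
  · simp [pvSuffs, h]
  · intro k h1 h2
    have hk : k < m := by simpa [pvSuffs, h] using h1
    have hkl : k < anagram.length := by omega
    simp [pvSuffs, List.getElem_dropLast, List.getD, List.getElem?_eq_getElem hkl]

-- A's per-anagram rhyme count is positive iff the suffix list has a duplicate
theorem pv_condA (anagram : List String) (m : Nat) (h : anagram.length = m + 1) :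
    (0 < ((PySem.List.pyRange 0 (PySem.List.len anagram - 1) 1).foldl (fun rhymes position =>
        let last_three := PySem.Str.slice (PySem.List.pyGetD anagram position "") (some (-3)) none
        let counter : Int :=
          (PySem.List.pyRange 0 (PySem.List.len anagram - 1) 1).foldl (fun counter i =>
            if PySem.Str.slice (PySem.List.pyGetD anagram i "") (some (-3)) none == last_three
            then counter + 1 else counter) 0
        if counter > 1 then rhymes + 1 else rhymes) 0 : Int))
      ↔ ¬ (pvSuffs anagram).Nodup := by
  have hlen : PySem.List.len anagram - 1 = ((m : Nat) : Int) := by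
    simp [PySem.List.len, h]
  rw [hlen, PySem.List.pyRange_zero_natCast]
  simp only [List.foldl_map, PySem.List.pyGetD_natCast, PySem.List.foldl_count_if]
  rw [pv_foldl_ite_pos]
  simp only [zero_add, Nat.one_lt_cast, List.mem_range]
  rw [pv_suffs_eq anagram m h]
  have hcount : ∀ k : Nat,
      ((List.range m).map (fun k' => pvLast3 (anagram.getD k' ""))).count
        (pvLast3 (anagram.getD k ""))
      = (List.range m).countP
        (fun i => PySem.Str.slice (anagram.getD i "") (some (-3)) none
            == PySem.Str.slice (anagram.getD k "") (some (-3)) none) := by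
    intro k
    simp [List.count_eq_countP, List.countP_map]
    rfl
  rw [← pv_exists_count]
  constructor
  · rintro ⟨k, hk, hcnt⟩
    refine ⟨pvLast3 (anagram.getD k ""), List.mem_map_of_mem (List.mem_range.mpr hk), ?_⟩
    rw [hcount k]
    exact hcnt
  · rintro ⟨x, hx, hcnt⟩
    rcases List.mem_map.mp hx with ⟨k, hk, hgk⟩
    refine ⟨k, List.mem_range.mp hk, ?_⟩
    rw [← hcount k]
    rw [hgk]
    exact hcnt

-- B's adjacent scan over the sorted suffixes fires iff the suffix list has a duplicate
theorem pv_condB (anagram : List String) :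
    ((let suffixes := PySem.List.sorted
        ((PySem.List.slice anagram none (some (-1))).map
          (fun w => PySem.Str.slice w (some (-3)) none)) (fun x => x) false
      (suffixes.zip (PySem.List.slice suffixes (some 1) none)).any (fun p => p.1 == p.2)) = true)
      ↔ ¬ (pvSuffs anagram).Nodup := by
  simp only [PySem.List.slice_to_neg_one, PySem.List.slice_from_one]
  rw [show anagram.dropLast.map (fun w => PySem.Str.slice w (some (-3)) none)
        = pvSuffs anagram from rfl]
  rw [pv_adj_any _ (PySem.List.sorted_pairwise _ _)]
  rw [List.Perm.nodup_iff (PySem.List.sorted_perm _ _ _)]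

theorem pv_step_eq (acc : List (List String)) (anagram : List String) (h : anagram ≠ []) :
    pvStepA acc anagram = pvStepB acc anagram := by
  obtain ⟨m, hm⟩ : ∃ m, anagram.length = m + 1 :=
    ⟨anagram.length - 1, by cases anagram <;> simp_all⟩
  unfold pvStepA pvStepB
  by_cases hd : ¬ (pvSuffs anagram).Nodup
  · rw [if_pos ((pv_condA anagram m hm).mpr hd), if_pos ((pv_condB anagram).mpr hd)]
  · rw [if_neg (fun hc => hd ((pv_condA anagram m hm).mp hc)),
        if_neg (fun hc => hd ((pv_condB anagram).mp hc))]

theorem pv_fold_eq (xs : List (List String)) (acc : List (List String))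
    (hx : ∀ a ∈ xs, a ≠ []) :
    xs.foldl pvStepA acc = xs.foldl pvStepB acc := by
  induction xs generalizing acc with
  | nil => rfl
  | cons a t IH =>
    simp only [List.foldl_cons]
    rw [pv_step_eq acc a (hx a (by simp))]
    exact IH _ (fun b hb => hx b (by simp [hb]))

-- ===== VERDICT (by name: the statement is the Claim_ definition above) =====
theorem rhymesto_spec : Claim_equal_rhymesto := by
  intro al _ hp
  unfold Spec_rhymesto
  show al.foldl pvStepA [] = al.foldl pvStepB []
  apply pv_fold_eq
  intro a ha
  have := List.all_eq_true.mp hp a ha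
  simpa using this

def rhymesto_raises : Claim_raises_rhymesto := by
  unfold Claim_raises_rhymesto
  constructor
  · intro al _ hr hp
    rcases List.any_eq_true.mp hr with ⟨a, ha, he⟩
    have := List.all_eq_true.mp hp a ha
    simp [List.isEmpty_iff] at he this
    exact this he
  · exact ⟨by decide, by decide, by decide⟩
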